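-- pv_equiv track=rewrite | github.com/santgm56/Reto_6 | Actividad_1/ejercicio_4.py | maxima_suma_consecutivos
-- ===== SOURCE A (Python) =====
-- def maxima_suma_consecutivos(lista):
--     """
--     Función que recibe una lista de números enteros y retorna
--     la mayor suma entre dos elementos consecutivos.
--     """
--     if len(lista) < 2:
--         raise ValueError("La lista debe contener al menos dos números.")
--
--     max_suma = lista[0] + lista[1]  # Iniciar con la primera suma válida
--     indice_1, indice_2 = 0, 1
--
--     for i in range(len(lista) - 1):
--         suma = lista[i] + lista[i + 1]
--         if suma > max_suma:
--             max_suma = suma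
--             indice_1, indice_2 = i, i + 1
--
--     return max_suma, indice_1, indice_2
-- ===== SOURCE B (Python) =====
-- def maxima_suma_consecutivos(lista):
--     """Materialize the table of consecutive-pair sums, then reduce:
--     max() picks the value, index() picks the earliest position."""
--     if len(lista) < 2:
--         raise ValueError("La lista debe contener al menos dos números.")
--     sums = [lista[i] + lista[i + 1] for i in range(len(lista) - 1)]
--     m = max(sums)
--     idx = sums.index(m)
--     return m, idx, idx + 1
-- ===== Notes on version B (the rewrite author's own statement) =====
-- stated objective: alternative
-- what changed: A tracks the running max and its indices inline in one index loop; B first materializes the full table of consecutive-pair sums, then reduces it in separate passes with max() and index() (earliest maximal index).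
import Mathlib
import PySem

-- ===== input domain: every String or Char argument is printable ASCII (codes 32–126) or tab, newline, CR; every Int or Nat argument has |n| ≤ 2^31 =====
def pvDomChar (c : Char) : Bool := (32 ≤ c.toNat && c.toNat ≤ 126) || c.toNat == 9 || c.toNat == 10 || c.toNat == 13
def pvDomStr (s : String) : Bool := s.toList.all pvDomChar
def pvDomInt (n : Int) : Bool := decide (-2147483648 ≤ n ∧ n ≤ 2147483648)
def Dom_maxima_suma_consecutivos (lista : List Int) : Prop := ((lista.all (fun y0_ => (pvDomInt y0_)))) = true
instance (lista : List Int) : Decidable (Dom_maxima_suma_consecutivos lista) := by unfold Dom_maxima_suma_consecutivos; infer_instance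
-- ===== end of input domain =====

-- B replaces A's inline running-max loop by materialize-then-reduce: build the table of
-- consecutive-pair sums, then take max() and its earliest index() in separate passes.

-- ===== PORT A =====
-- literal port of A: single index loop tracking (max_suma, indice_1, indice_2);
-- pyGetD is exact here since every index the loop touches is in range under Pre_.
def maxima_suma_consecutivos (lista : List Int) : Int × Int × Int :=
  (PySem.List.pyRange 0 (PySem.List.len lista - 1)).foldl
    (fun acc i =>
      let suma := PySem.List.pyGetD lista i 0 + PySem.List.pyGetD lista (i + 1) 0
      if suma > acc.1 then (suma, i, i + 1) else acc)
    (PySem.List.pyGetD lista 0 0 + PySem.List.pyGetD lista 1 0, 0, 1)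

-- ===== PORT B =====
-- literal port of Source B: sums table, then max(sums) and sums.index(m).
def maxima_suma_consecutivos_alt (lista : List Int) : Int × Int × Int :=
  let sums := (PySem.List.pyRange 0 (PySem.List.len lista - 1)).map
    (fun i => PySem.List.pyGetD lista i 0 + PySem.List.pyGetD lista (i + 1) 0)
  let m := (PySem.List.max? sums (fun x => x)).getD 0
  let idx : Nat := (PySem.List.index? sums m).getD 0
  (m, (idx : Int), (idx : Int) + 1)

-- ===== PRECONDITION & SPEC =====
-- A raises ValueError when len(lista) < 2; exactly those inputs are excluded.
def Pre_maxima_suma_consecutivos (lista : List Int) : Prop := 2 ≤ lista.length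
instance (lista : List Int) : Decidable (Pre_maxima_suma_consecutivos lista) := by unfold Pre_maxima_suma_consecutivos; infer_instance
def pvWitness_maxima_suma_consecutivos : List Int := [1, 2, -3]

def Spec_maxima_suma_consecutivos (lista : List Int) (out : Int × Int × Int) : Prop := out = maxima_suma_consecutivos_alt lista
instance (lista : List Int) (out : Int × Int × Int) : Decidable (Spec_maxima_suma_consecutivos lista out) := by unfold Spec_maxima_suma_consecutivos; infer_instance

-- ===== CLAIM (what is proved, stated in full; the proofs are below) =====
def Claim_equal_maxima_suma_consecutivos : Prop := ∀ (lista : List Int), Dom_maxima_suma_consecutivos lista → Pre_maxima_suma_consecutivos lista → Spec_maxima_suma_consecutivos lista (maxima_suma_consecutivos lista)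

-- ===== LEMMAS AND PROOFS =====

lemma foldl_max_eq_or_mem (t : List Int) (a : Int) :
    t.foldl max a = a ∨ t.foldl max a ∈ t := by
  induction t generalizing a with
  | nil => left; rfl
  | cons x xs ih =>
    rcases ih (max a x) with h | h
    · rcases max_cases a x with ⟨hm, _⟩ | ⟨hm, _⟩
      · left; rw [List.foldl_cons, h, hm]
      · right; rw [List.foldl_cons, h, hm]; exact List.mem_cons_self
    · right; exact List.mem_cons_of_mem _ h

lemma loop_char (s : List Int) (k m j1 j2 : Int) :
    (PySem.List.enumerate s k).foldl
      (fun acc p => if p.2 > acc.1 then (p.2, p.1, p.1 + 1) else acc) (m, j1, j2)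
    = if ∃ v ∈ s, m < v then
        (s.foldl max m,
         k + (((PySem.List.index? s (s.foldl max m)).getD 0 : Nat) : Int),
         k + (((PySem.List.index? s (s.foldl max m)).getD 0 : Nat) : Int) + 1)
      else (m, j1, j2) := by
  induction s generalizing k m j1 j2 with
  | nil => simp [PySem.List.enumerate_nil]
  | cons v t ih =>
    rw [PySem.List.enumerate_cons, List.foldl_cons]
    by_cases hv : m < v
    · have hstep : (if (k, v).2 > (m, j1, j2).1 then ((k, v).2, (k, v).1, (k, v).1 + 1) else (m, j1, j2)) = ((v, k, k + 1) : Int × Int × Int) := by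
        simp [hv]
      rw [hstep, ih]
      have hmaxm : (v :: t).foldl max m = t.foldl max v := by
        rw [List.foldl_cons, max_eq_right hv.le]
      have hcond : ∃ w ∈ v :: t, m < w := ⟨v, List.mem_cons_self, hv⟩
      rw [if_pos hcond, hmaxm]
      by_cases h2 : ∃ w ∈ t, v < w
      · obtain ⟨w, hw, hvw⟩ := h2
        have hwM := (PySem.List.le_foldl_max t v).2 w hw
        have hvM : v < t.foldl max v := lt_of_lt_of_le hvw hwM
        have hne : v ≠ t.foldl max v := ne_of_lt hvM
        have hMmem : t.foldl max v ∈ t := by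
          rcases foldl_max_eq_or_mem t v with h | h
          · exact absurd h.symm hne
          · exact h
        obtain ⟨i, hi⟩ := Option.isSome_iff_exists.mp
          ((PySem.List.index?_isSome_iff t (t.foldl max v)).mpr hMmem)
        rw [if_pos ⟨w, hw, hvw⟩, PySem.List.index?_cons_of_ne t hne, hi]
        simp only [Option.map_some, Option.getD_some]
        refine Prod.ext ?_ (Prod.ext ?_ ?_) <;> simp <;> ring
      · push Not at h2
        have hle : t.foldl max v ≤ v := by
          rcases foldl_max_eq_or_mem t v with h | h
          · rw [h]
          · exact le_of_not_gt (fun hlt => absurd hlt (by simpa using h2 _ h))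
        have hM : t.foldl max v = v := le_antisymm hle (PySem.List.le_foldl_max t v).1
        rw [if_neg (by push Not; intro w hw; exact not_lt.mp fun hc => absurd hc (by simpa using h2 w hw)), hM,
          PySem.List.index?_cons_self]
        simp
    · have hstep : (if (k, v).2 > (m, j1, j2).1 then ((k, v).2, (k, v).1, (k, v).1 + 1) else (m, j1, j2)) = ((m, j1, j2) : Int × Int × Int) := by
        simp [hv]
      rw [hstep, ih]
      have hvm : v ≤ m := not_lt.mp hv
      have hmaxm : (v :: t).foldl max m = t.foldl max m := by
        rw [List.foldl_cons, max_eq_left hvm]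
      by_cases h2 : ∃ w ∈ t, m < w
      · obtain ⟨w, hw, hmw⟩ := h2
        have hwM := (PySem.List.le_foldl_max t m).2 w hw
        have hmM : m < t.foldl max m := lt_of_lt_of_le hmw hwM
        have hne : v ≠ t.foldl max m := ne_of_lt (lt_of_le_of_lt hvm hmM)
        have hMmem : t.foldl max m ∈ t := by
          rcases foldl_max_eq_or_mem t m with h | h
          · exact absurd h (ne_of_gt hmM)
          · exact h
        obtain ⟨i, hi⟩ := Option.isSome_iff_exists.mp
          ((PySem.List.index?_isSome_iff t (t.foldl max m)).mpr hMmem)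
        rw [if_pos ⟨w, hw, hmw⟩, if_pos ⟨w, List.mem_cons_of_mem _ hw, hmw⟩, hmaxm,
          PySem.List.index?_cons_of_ne t hne, hi]
        simp only [Option.map_some, Option.getD_some]
        refine Prod.ext ?_ (Prod.ext ?_ ?_) <;> simp <;> ring
      · have hc : ¬ ∃ w ∈ v :: t, m < w := by
          push Not at h2 ⊢
          intro w hw
          rcases List.mem_cons.mp hw with rfl | hw'
          · exact hvm
          · exact h2 w hw'
        rw [if_neg h2, if_neg hc]

lemma key_reduce (F : Int → Int) (n : Nat) (hn : 1 ≤ n) :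
    (PySem.List.pyRange 0 (n : Int)).foldl
      (fun acc i => if F i > acc.1 then (F i, i, i + 1) else acc) (F 0, 0, 1)
    = ((PySem.List.max? ((PySem.List.pyRange 0 (n : Int)).map F) (fun x => x)).getD 0,
       (((PySem.List.index? ((PySem.List.pyRange 0 (n : Int)).map F)
           ((PySem.List.max? ((PySem.List.pyRange 0 (n : Int)).map F) (fun x => x)).getD 0)).getD 0 : Nat) : Int),
       (((PySem.List.index? ((PySem.List.pyRange 0 (n : Int)).map F)
           ((PySem.List.max? ((PySem.List.pyRange 0 (n : Int)).map F) (fun x => x)).getD 0)).getD 0 : Nat) : Int) + 1) := by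
  have h0n : (0 : Int) < (n : Int) := by exact_mod_cast hn
  set s : List Int := (PySem.List.pyRange 0 (n : Int)).map F with hs
  have hvt : s = F 0 :: (PySem.List.pyRange 1 (n : Int)).map F := by
    rw [hs, PySem.List.pyRange_one_cons h0n, List.map_cons]
    norm_num
  have hlens : PySem.List.len s = (n : Int) := by
    simp [PySem.List.len_eq, hs, PySem.List.length_pyRange_one]
  have hLHS :
      (PySem.List.pyRange 0 (n : Int)).foldl
        (fun acc i => if F i > acc.1 then (F i, i, i + 1) else acc) (F 0, 0, 1)
      = (PySem.List.enumerate s 0).foldl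
          (fun acc p => if p.2 > acc.1 then (p.2, p.1, p.1 + 1) else acc) (F 0, 0, 1) := by
    rw [PySem.List.enumerate_eq_map_pyRange s 0, List.foldl_map, hlens]
    refine PySem.List.foldl_congr_mem _ _ _ _ ?_
    intro acc x hx
    have hx' := (PySem.List.mem_pyRange_one).mp hx
    obtain ⟨kk, rfl⟩ : ∃ kk : Nat, x = (kk : Int) := ⟨x.toNat, by omega⟩
    have hkk : kk < n := by exact_mod_cast hx'.2
    rw [hs, PySem.List.pyGetD_map_pyRange F n kk 0 hkk]
  rw [hLHS, loop_char s 0 (F 0) 0 1]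
  have hM : s.foldl max (F 0) = (PySem.List.max? s (fun x => x)).getD 0 := by
    rw [hvt, PySem.List.max?_id_cons]
    simp [List.foldl_cons]
  by_cases hex : ∃ v ∈ s, F 0 < v
  · rw [if_pos hex, hM]
    simp
  · rw [if_neg hex]
    have hle : s.foldl max (F 0) ≤ F 0 := by
      rcases foldl_max_eq_or_mem s (F 0) with h | h
      · rw [h]
      · push Not at hex
        exact not_lt.mp fun hc => absurd hc (by simpa using hex _ h)
    have hMv : (PySem.List.max? s (fun x => x)).getD 0 = F 0 := by
      rw [← hM]
      exact le_antisymm hle (PySem.List.le_foldl_max s (F 0)).1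
    rw [hMv, hvt, PySem.List.index?_cons_self]
    simp

theorem maxima_suma_consecutivos_AB (lista : List Int)
    (h : 2 ≤ lista.length) :
    maxima_suma_consecutivos lista = maxima_suma_consecutivos_alt lista := by
  unfold maxima_suma_consecutivos maxima_suma_consecutivos_alt
  obtain ⟨N, hN⟩ : ∃ N : Nat, lista.length = N + 2 := ⟨lista.length - 2, by omega⟩
  have hlen : PySem.List.len lista - 1 = ((N + 1 : Nat) : Int) := by
    simp [PySem.List.len_eq, hN]
    ring
  rw [hlen]
  exact key_reduce (fun i => PySem.List.pyGetD lista i 0 + PySem.List.pyGetD lista (i + 1) 0)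
    (N + 1) (by omega)

-- ===== VERDICT (by name: the statement is the Claim_ definition above) =====
theorem maxima_suma_consecutivos_spec : Claim_equal_maxima_suma_consecutivos := by
  intro lista _ hpre
  unfold Spec_maxima_suma_consecutivos
  exact maxima_suma_consecutivos_AB lista hpre
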